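-- pv_equiv track=rewrite | github.com/cdhx/QDTQA | QDT2SExpr/structure_filling_error_analysis.py | remove_ignored_tokens
-- ===== SOURCE A (Python) =====
-- ignored_tokens = ['<pad>', '</s>']
--
-- def remove_ignored_tokens(sexpr):
--     for tok in ignored_tokens:
--         sexpr = sexpr.replace(tok, ' '+tok+' ')
--     new_sexpr = []
--     for tok in sexpr.split():
--         if tok not in ignored_tokens:
--             new_sexpr.append(tok)
--     return " ".join(new_sexpr)
-- ===== SOURCE B (Python) =====
-- ignored_tokens = ['<pad>', '</s>']
--
-- def remove_ignored_tokens(sexpr):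
--     # delete the ignored tokens by direct substitution, then normalise whitespace
--     cleaned = sexpr.replace('<pad>', ' ').replace('</s>', ' ')
--     return ' '.join(cleaned.split())
-- ===== Notes on version B (the rewrite author's own statement) =====
-- stated objective: simpler
-- what changed: B deletes each ignored token by substituting a single space and then re-joins cleaned.split(), removing A's pad-with-spaces pass, the explicit token-accumulating loop and the membership filter.
import Mathlib
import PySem

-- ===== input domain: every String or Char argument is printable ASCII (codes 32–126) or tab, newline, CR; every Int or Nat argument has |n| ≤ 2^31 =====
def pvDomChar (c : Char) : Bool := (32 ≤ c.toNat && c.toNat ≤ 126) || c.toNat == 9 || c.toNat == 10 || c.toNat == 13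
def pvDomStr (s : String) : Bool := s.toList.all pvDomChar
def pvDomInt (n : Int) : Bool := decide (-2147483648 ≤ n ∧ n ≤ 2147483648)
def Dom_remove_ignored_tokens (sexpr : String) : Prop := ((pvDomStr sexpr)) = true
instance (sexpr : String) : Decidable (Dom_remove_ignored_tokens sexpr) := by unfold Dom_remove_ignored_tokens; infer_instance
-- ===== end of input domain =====

-- B removes each ignored token by substituting a space and re-normalising whitespace,
-- instead of A's pad-with-spaces, split, membership-filter, join (objective: simpler).

-- ===== PORT A =====
def ignored_tokens : List String := ["<pad>", "</s>"]

def remove_ignored_tokens (sexpr : String) : String :=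
  let padded := ignored_tokens.foldl
    (fun s tok => PySem.Str.replace s tok (" " ++ tok ++ " ")) sexpr
  let new_sexpr := (PySem.Str.split₀ padded).foldl
    (fun acc tok => if tok ∈ ignored_tokens then acc else acc ++ [tok]) []
  PySem.Str.join " " new_sexpr

-- ===== PORT B =====
def remove_ignored_tokens_alt (sexpr : String) : String :=
  let cleaned := PySem.Str.replace (PySem.Str.replace sexpr "<pad>" " ") "</s>" " "
  PySem.Str.join " " (PySem.Str.split₀ cleaned)

-- ===== PRECONDITION & SPEC =====
def Spec_remove_ignored_tokens (sexpr : String) (out : String) : Prop := out = remove_ignored_tokens_alt sexpr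
instance (sexpr : String) (out : String) : Decidable (Spec_remove_ignored_tokens sexpr out) := by unfold Spec_remove_ignored_tokens; infer_instance

-- ===== CLAIM (what is proved, stated in full; the proofs are below) =====
def Claim_equal_remove_ignored_tokens : Prop := ∀ (sexpr : String), Dom_remove_ignored_tokens sexpr → Spec_remove_ignored_tokens sexpr (remove_ignored_tokens sexpr)

-- ===== LEMMAS AND PROOFS =====

-- the two ignored tokens, as character lists
def padT : List Char := ['<', 'p', 'a', 'd', '>']
def eosT : List Char := ['<', '/', 's', '>']
-- replacement strings of pipeline A: the token padded with spaces
def spP : List Char := ' ' :: padT ++ [' ']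
def spE : List Char := ' ' :: eosT ++ [' ']

-- fuelled structural version of PySem.Chars.replace.go (without the reversed accumulator)
def replF (old new : List Char) : Nat → List Char → List Char
  | _, [] => []
  | 0, l => l
  | f + 1, c :: t =>
    if old.isPrefixOf (c :: t) then new ++ replF old new f (List.drop old.length (c :: t))
    else c :: replF old new f t

lemma go_eq_replF (old new : List Char) :
    ∀ (fuel : Nat) (l acc : List Char),
      PySem.Chars.replace.go old new fuel l acc = acc.reverse ++ replF old new fuel l := by
  intro fuel
  induction fuel with
  | zero =>
    intro l acc
    rw [PySem.Chars.replace.go.eq_def]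
    cases l <;> simp [replF]
  | succ f ih =>
    intro l acc
    rw [PySem.Chars.replace.go.eq_def]
    cases l with
    | nil => simp [replF]
    | cons c t =>
      by_cases h : old.isPrefixOf (c :: t)
      · simp [h, replF, ih]
      · simp [h, replF, ih]

lemma replace_eq_replF (s old new : List Char) (h : old ≠ []) :
    PySem.Chars.replace s old new = replF old new s.length s := by
  rw [PySem.Chars.replace.eq_def]
  have : old.isEmpty = false := by cases old <;> simp_all
  simp [this, go_eq_replF]

lemma replF_fuel (old new : List Char) (hold : old ≠ []) :
    ∀ (f g : Nat) (l : List Char), l.length ≤ f → l.length ≤ g →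
      replF old new f l = replF old new g l := by
  intro f
  induction f with
  | zero =>
    intro g l hf _; interval_cases hl : l.length
    · cases l <;> simp_all [replF]
  | succ f ih =>
    intro g l hf hg
    cases l with
    | nil => cases g <;> simp [replF]
    | cons c t =>
      cases g with
      | zero => simp at hg
      | succ g =>
        have hlen : 1 ≤ old.length := by cases old <;> simp_all
        by_cases h : old.isPrefixOf (c :: t)
        · simp only [replF, h, if_pos]
          congr 1
          apply ih
          · simp only [List.length_drop]; simp at hf ⊢; omega
          · simp only [List.length_drop]; simp at hg ⊢; omega
        · simp only [replF, h, if_neg, Bool.false_eq_true, not_false_iff]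
          congr 1
          apply ih <;> simp_all

-- structural rewrite rules for replace (old nonempty)
lemma replace_nil (old new : List Char) (h : old ≠ []) :
    PySem.Chars.replace [] old new = [] := by
  rw [replace_eq_replF _ _ _ h]; simp [replF]

lemma replace_pos (l old new : List Char) (h : old ≠ []) (hp : old.isPrefixOf l) :
    PySem.Chars.replace l old new =
      new ++ PySem.Chars.replace (List.drop old.length l) old new := by
  cases l with
  | nil =>
    have : old = [] := by
      cases old with
      | nil => rfl
      | cons o os => simp [List.isPrefixOf] at hp
    exact absurd this h
  | cons c t =>
    rw [replace_eq_replF _ _ _ h, replace_eq_replF _ _ _ h]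
    have hlen : 1 ≤ old.length := by cases old <;> simp_all
    simp only [List.length_cons, replF, hp, if_pos]
    congr 1
    apply replF_fuel _ _ h
    · simp [List.length_drop]; omega
    · simp

lemma replace_neg (c : Char) (t old new : List Char) (h : old ≠ [])
    (hp : ¬ old.isPrefixOf (c :: t)) :
    PySem.Chars.replace (c :: t) old new = c :: PySem.Chars.replace t old new := by
  rw [replace_eq_replF _ _ _ h, replace_eq_replF _ _ _ h]
  simp only [List.length_cons, replF, hp, if_neg, Bool.false_eq_true, not_false_iff]

-- structural version of PySem.Chars.split₀ (cur holds the current token reversed)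
def splitW : List Char → List Char → List (List Char)
  | [], cur => if cur.isEmpty then [] else [cur.reverse]
  | c :: rest, cur =>
    if PySem.Chars.isspace c then
      (if cur.isEmpty then splitW rest [] else cur.reverse :: splitW rest [])
    else splitW rest (c :: cur)

lemma split₀go_eq_splitW :
    ∀ (l cur : List Char) (acc : List (List Char)),
      PySem.Chars.split₀.go l cur acc = acc.reverse ++ splitW l cur := by
  intro l
  induction l with
  | nil =>
    intro cur acc
    rw [PySem.Chars.split₀.go.eq_def]
    by_cases h : cur.isEmpty <;> simp [h, splitW]
  | cons c rest ih =>
    intro cur acc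
    rw [PySem.Chars.split₀.go.eq_def]
    by_cases hs : PySem.Chars.isspace c
    · by_cases h : cur.isEmpty <;> simp [hs, h, splitW, ih]
    · simp [hs, splitW, ih]

lemma split₀_eq_splitW (s : List Char) : PySem.Chars.split₀ s = splitW s [] := by
  show PySem.Chars.split₀.go s [] [] = _
  simp [split₀go_eq_splitW]

-- flush of the current (reversed) token
def flushW (cur : List Char) : List (List Char) := if cur.isEmpty then [] else [cur.reverse]

-- the fused one-pass tokenizer both pipelines are reduced to
def tokW : List Char → List Char → List (List Char)
  | [], cur => flushW cur
  | c :: t, cur =>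
    if padT.isPrefixOf (c :: t) then flushW cur ++ tokW (List.drop 5 (c :: t)) []
    else if eosT.isPrefixOf (c :: t) then flushW cur ++ tokW (List.drop 4 (c :: t)) []
    else if PySem.Chars.isspace c then flushW cur ++ tokW t []
    else tokW t (c :: cur)
termination_by s _ => s.length
decreasing_by all_goals simp [List.length_drop]

-- the two pipelines, at the character level
def pipeA (s : List Char) : List Char :=
  PySem.Chars.replace (PySem.Chars.replace s padT spP) eosT spE
def pipeB (s : List Char) : List Char :=
  PySem.Chars.replace (PySem.Chars.replace s padT [' ']) eosT [' ']

lemma padT_ne : padT ≠ [] := by decide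
lemma eosT_ne : eosT ≠ [] := by decide

-- replacing padT (by a string starting with a space) neither creates nor destroys
-- prefix-occurrences of (suffixes of) eosT; four concrete lemmas, one per suffix
lemma prefE1 (x' : List Char) (s : List Char) :
    List.isPrefixOf ['>'] (PySem.Chars.replace s padT (' ' :: x')) =
      List.isPrefixOf ['>'] s := by
  cases s with
  | nil => rw [replace_nil _ _ padT_ne]
  | cons c t =>
    by_cases h : padT.isPrefixOf (c :: t)
    · rw [replace_pos _ _ _ padT_ne h]
      have hc : c = '<' := by
        simp [padT, List.isPrefixOf] at h; exact h.1.symm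
      subst hc
      simp [List.isPrefixOf]
    · rw [replace_neg _ _ _ _ padT_ne h]
      simp [List.isPrefixOf]

lemma prefE2 (x' : List Char) (s : List Char) :
    List.isPrefixOf ['s', '>'] (PySem.Chars.replace s padT (' ' :: x')) =
      List.isPrefixOf ['s', '>'] s := by
  cases s with
  | nil => rw [replace_nil _ _ padT_ne]
  | cons c t =>
    by_cases h : padT.isPrefixOf (c :: t)
    · rw [replace_pos _ _ _ padT_ne h]
      have hc : c = '<' := by
        simp [padT, List.isPrefixOf] at h; exact h.1.symm
      subst hc
      simp [List.isPrefixOf]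
    · rw [replace_neg _ _ _ _ padT_ne h]
      simp [List.isPrefixOf, prefE1 x' t]

lemma prefE3 (x' : List Char) (s : List Char) :
    List.isPrefixOf ['/', 's', '>'] (PySem.Chars.replace s padT (' ' :: x')) =
      List.isPrefixOf ['/', 's', '>'] s := by
  cases s with
  | nil => rw [replace_nil _ _ padT_ne]
  | cons c t =>
    by_cases h : padT.isPrefixOf (c :: t)
    · rw [replace_pos _ _ _ padT_ne h]
      have hc : c = '<' := by
        simp [padT, List.isPrefixOf] at h; exact h.1.symm
      subst hc
      simp [List.isPrefixOf]
    · rw [replace_neg _ _ _ _ padT_ne h]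
      simp [List.isPrefixOf, prefE2 x' t]

lemma prefE4 (x' : List Char) (s : List Char) :
    List.isPrefixOf eosT (PySem.Chars.replace s padT (' ' :: x')) =
      List.isPrefixOf eosT s := by
  cases s with
  | nil => rw [replace_nil _ _ padT_ne]
  | cons c t =>
    by_cases h : padT.isPrefixOf (c :: t)
    · rw [replace_pos _ _ _ padT_ne h]
      have ht : c = '<' ∧ ∃ t', t = 'p' :: 'a' :: 'd' :: '>' :: t' := by
        cases t with
        | nil => simp [padT, List.isPrefixOf] at h
        | cons c2 t2 =>
          cases t2 with
          | nil => simp [padT, List.isPrefixOf] at h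
          | cons c3 t3 =>
            cases t3 with
            | nil => simp [padT, List.isPrefixOf] at h
            | cons c4 t4 =>
              cases t4 with
              | nil => simp [padT, List.isPrefixOf] at h
              | cons c5 t5 =>
                simp [padT, List.isPrefixOf] at h
                obtain ⟨h1, h2, h3, h4, h5⟩ := h
                exact ⟨h1.symm, t5, by rw [← h2, ← h3, ← h4, ← h5]⟩
      obtain ⟨hc, t', ht'⟩ := ht
      subst hc; subst ht'
      simp [eosT, List.isPrefixOf]
    · rw [replace_neg _ _ _ _ padT_ne h]
      simp [eosT, List.isPrefixOf, prefE3 x' t]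

-- pipeline recurrences
lemma pipeA_nil : pipeA [] = [] := by
  unfold pipeA
  rw [replace_nil _ _ padT_ne, replace_nil _ _ eosT_ne]

lemma pipeB_nil : pipeB [] = [] := by
  unfold pipeB
  rw [replace_nil _ _ padT_ne, replace_nil _ _ eosT_ne]

lemma eos_not_pref_head {c : Char} (hc : ('<' == c) = false) (X : List Char) :
    ¬ eosT.isPrefixOf (c :: X) := by
  simp [eosT, List.isPrefixOf, hc]

lemma pipeA_pad (s : List Char) (h : padT.isPrefixOf s) :
    pipeA s = ' ' :: '<' :: 'p' :: 'a' :: 'd' :: '>' :: ' ' :: pipeA (List.drop 5 s) := by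
  unfold pipeA
  rw [replace_pos _ _ _ padT_ne h]
  show PySem.Chars.replace
      (' ' :: '<' :: 'p' :: 'a' :: 'd' :: '>' :: ' ' ::
        PySem.Chars.replace (List.drop padT.length s) padT spP) eosT spE = _
  rw [replace_neg _ _ _ _ eosT_ne (eos_not_pref_head (by decide) _),
      replace_neg _ _ _ _ eosT_ne (by simp [eosT, List.isPrefixOf]),
      replace_neg _ _ _ _ eosT_ne (eos_not_pref_head (by decide) _),
      replace_neg _ _ _ _ eosT_ne (eos_not_pref_head (by decide) _),
      replace_neg _ _ _ _ eosT_ne (eos_not_pref_head (by decide) _),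
      replace_neg _ _ _ _ eosT_ne (eos_not_pref_head (by decide) _),
      replace_neg _ _ _ _ eosT_ne (eos_not_pref_head (by decide) _)]
  rfl

lemma pipeB_pad (s : List Char) (h : padT.isPrefixOf s) :
    pipeB s = ' ' :: pipeB (List.drop 5 s) := by
  unfold pipeB
  rw [replace_pos _ _ _ padT_ne h]
  show PySem.Chars.replace
      (' ' :: PySem.Chars.replace (List.drop padT.length s) padT [' ']) eosT [' '] = _
  rw [replace_neg _ _ _ _ eosT_ne (eos_not_pref_head (by decide) _)]
  rfl

lemma pad_shape (s : List Char) (h2 : ¬ padT.isPrefixOf s) (h : eosT.isPrefixOf s) :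
    ∃ t, s = '<' :: '/' :: 's' :: '>' :: t := by
  cases s with
  | nil => simp [eosT] at h
  | cons c1 t1 =>
    cases t1 with
    | nil => simp [eosT, List.isPrefixOf] at h
    | cons c2 t2 =>
      cases t2 with
      | nil => simp [eosT, List.isPrefixOf] at h
      | cons c3 t3 =>
        cases t3 with
        | nil => simp [eosT, List.isPrefixOf] at h
        | cons c4 t4 =>
          simp [eosT, List.isPrefixOf] at h
          obtain ⟨h1, h2', h3, h4⟩ := h
          exact ⟨t4, by rw [← h1, ← h2', ← h3, ← h4]⟩

lemma inner_eos (t : List Char) (x : List Char) :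
    PySem.Chars.replace ('<' :: '/' :: 's' :: '>' :: t) padT x =
      '<' :: '/' :: 's' :: '>' :: PySem.Chars.replace t padT x := by
  rw [replace_neg _ _ _ _ padT_ne (by simp [padT, List.isPrefixOf]),
      replace_neg _ _ _ _ padT_ne (by simp [padT, List.isPrefixOf]),
      replace_neg _ _ _ _ padT_ne (by simp [padT, List.isPrefixOf]),
      replace_neg _ _ _ _ padT_ne (by simp [padT, List.isPrefixOf])]

lemma pipeA_eos (s : List Char) (h2 : ¬ padT.isPrefixOf s) (h : eosT.isPrefixOf s) :
    pipeA s = ' ' :: '<' :: '/' :: 's' :: '>' :: ' ' :: pipeA (List.drop 4 s) := by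
  obtain ⟨t, rfl⟩ := pad_shape s h2 h
  unfold pipeA
  rw [inner_eos]
  rw [replace_pos _ _ _ eosT_ne (by simp [eosT, List.isPrefixOf])]
  rfl

lemma pipeB_eos (s : List Char) (h2 : ¬ padT.isPrefixOf s) (h : eosT.isPrefixOf s) :
    pipeB s = ' ' :: pipeB (List.drop 4 s) := by
  obtain ⟨t, rfl⟩ := pad_shape s h2 h
  unfold pipeB
  rw [inner_eos]
  rw [replace_pos _ _ _ eosT_ne (by simp [eosT, List.isPrefixOf])]
  rfl

lemma pipeA_cons (c : Char) (t : List Char) (h1 : ¬ padT.isPrefixOf (c :: t))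
    (h2 : ¬ eosT.isPrefixOf (c :: t)) : pipeA (c :: t) = c :: pipeA t := by
  unfold pipeA
  rw [replace_neg _ _ _ _ padT_ne h1]
  have hep : ¬ eosT.isPrefixOf (c :: PySem.Chars.replace t padT spP) := by
    have := prefE4 (padT ++ [' ']) (c :: t)
    rw [replace_neg _ _ _ _ padT_ne h1] at this
    show ¬ eosT.isPrefixOf (c :: PySem.Chars.replace t padT (' ' :: (padT ++ [' '])))
    rw [this]; exact h2
  rw [replace_neg _ _ _ _ eosT_ne hep]

lemma pipeB_cons (c : Char) (t : List Char) (h1 : ¬ padT.isPrefixOf (c :: t))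
    (h2 : ¬ eosT.isPrefixOf (c :: t)) : pipeB (c :: t) = c :: pipeB t := by
  unfold pipeB
  rw [replace_neg _ _ _ _ padT_ne h1]
  have hep : ¬ eosT.isPrefixOf (c :: PySem.Chars.replace t padT [' ']) := by
    have := prefE4 [] (c :: t)
    rw [replace_neg _ _ _ _ padT_ne h1] at this
    show ¬ eosT.isPrefixOf (c :: PySem.Chars.replace t padT (' ' :: []))
    rw [this]; exact h2
  rw [replace_neg _ _ _ _ eosT_ne hep]

-- splitW helpers
lemma splitW_space (r cur : List Char) :
    splitW (' ' :: r) cur = flushW cur ++ splitW r [] := by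
  by_cases h : cur.isEmpty <;> simp [splitW, flushW, h, (by decide : PySem.Chars.isspace ' ' = true)]

lemma splitW_nonspace {c : Char} (hc : PySem.Chars.isspace c = false) (r cur : List Char) :
    splitW (c :: r) cur = splitW r (c :: cur) := by
  simp [splitW, hc]

def keepC (tk : List Char) : Bool := !(tk == padT || tk == eosT)

lemma filter_flush (cur : List Char)
    (h : cur.reverse ≠ padT ∧ cur.reverse ≠ eosT) :
    List.filter keepC (flushW cur) = flushW cur := by
  by_cases hc : cur.isEmpty
  · simp [flushW, hc]
  · simp [flushW, hc, List.filter, keepC, h.1, h.2]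

-- the invariant carried through pipeline A: no accumulated partial token overlaps an
-- ignored-token occurrence that the padding pass would have isolated
def InvW (cur s : List Char) : Prop :=
  ∀ n, 0 < n → n ≤ cur.length →
    ¬ padT.isPrefixOf ((cur.take n).reverse ++ s) ∧
    ¬ eosT.isPrefixOf ((cur.take n).reverse ++ s)

lemma invW_nil (s : List Char) : InvW [] s := by
  intro n hn hln; simp at hln; omega

lemma invW_flush (cur s : List Char) (h : InvW cur s) :
    cur.reverse ≠ padT ∧ cur.reverse ≠ eosT := by
  constructor
  · intro he
    rcases cur with _ | ⟨c, cs⟩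
    · simp [padT] at he
    · have := (h (c :: cs).length (by simp) (le_refl _)).1
      rw [List.take_length] at this
      exact this (by rw [he]; exact List.isPrefixOf_iff_prefix.2 (List.prefix_append _ _))
  · intro he
    rcases cur with _ | ⟨c, cs⟩
    · simp [eosT] at he
    · have := (h (c :: cs).length (by simp) (le_refl _)).2
      rw [List.take_length] at this
      exact this (by rw [he]; exact List.isPrefixOf_iff_prefix.2 (List.prefix_append _ _))

lemma invW_step (cur : List Char) (c : Char) (t : List Char)
    (h : InvW cur (c :: t)) (h1 : ¬ padT.isPrefixOf (c :: t))
    (h2 : ¬ eosT.isPrefixOf (c :: t)) : InvW (c :: cur) t := by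
  intro n hn hln
  cases n with
  | zero => omega
  | succ m =>
    cases Nat.eq_zero_or_pos m with
    | inl hm => subst hm; simpa using And.intro h1 h2
    | inr hm =>
      have := h m hm (by simpa using hln)
      simpa [List.take_succ_cons, List.reverse_cons, List.append_assoc] using this

-- pipeline A, tokenized and filtered, equals the fused tokenizer
lemma thmA : ∀ (s cur : List Char), InvW cur s →
    List.filter keepC (splitW (pipeA s) cur) = tokW s cur := by
  intro s cur
  induction s, cur using tokW.induct with
  | case1 cur =>
    intro hI
    rw [pipeA_nil]
    have h0 : splitW [] cur = flushW cur := by simp [splitW, flushW]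
    rw [h0, filter_flush _ (invW_flush _ _ hI), show tokW [] cur = flushW cur from by simp [tokW]]
  | case2 c t cur hp ih =>
    intro hI
    rw [pipeA_pad _ hp, splitW_space,
        splitW_nonspace (by decide), splitW_nonspace (by decide),
        splitW_nonspace (by decide), splitW_nonspace (by decide),
        splitW_nonspace (by decide), splitW_space,
        List.filter_append, List.filter_append,
        filter_flush _ (invW_flush _ _ hI),
        show List.filter keepC (flushW ['>', 'd', 'a', 'p', '<']) = [] from by decide,
        ih (invW_nil _)]
    simp [tokW, hp]
  | case3 c t cur hp he ih =>
    intro hI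
    rw [pipeA_eos _ hp he, splitW_space,
        splitW_nonspace (by decide), splitW_nonspace (by decide),
        splitW_nonspace (by decide), splitW_nonspace (by decide), splitW_space,
        List.filter_append, List.filter_append,
        filter_flush _ (invW_flush _ _ hI),
        show List.filter keepC (flushW ['>', 's', '/', '<']) = [] from by decide,
        ih (invW_nil _)]
    simp [tokW, hp, he]
  | case4 c t cur hp he hs ih =>
    intro hI
    rw [pipeA_cons _ _ hp he]
    have h0 : splitW (c :: pipeA t) cur = flushW cur ++ splitW (pipeA t) [] := by
      by_cases h : cur.isEmpty <;> simp [splitW, flushW, hs, h]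
    rw [h0, List.filter_append, filter_flush _ (invW_flush _ _ hI), ih (invW_nil _)]
    simp [tokW, hp, he, hs]
  | case5 c t cur hp he hs ih =>
    intro hI
    rw [pipeA_cons _ _ hp he, splitW_nonspace (by simpa using hs),
        ih (invW_step _ _ _ hI hp he)]
    simp [tokW, hp, he, hs]

-- pipeline B, tokenized, equals the fused tokenizer
lemma thmB : ∀ (s cur : List Char), splitW (pipeB s) cur = tokW s cur := by
  intro s cur
  induction s, cur using tokW.induct with
  | case1 cur =>
    rw [pipeB_nil]
    simp [splitW, flushW, tokW]
  | case2 c t cur hp ih =>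
    rw [pipeB_pad _ hp, splitW_space, ih]
    simp [tokW, hp]
  | case3 c t cur hp he ih =>
    rw [pipeB_eos _ hp he, splitW_space, ih]
    simp [tokW, hp, he]
  | case4 c t cur hp he hs ih =>
    rw [pipeB_cons _ _ hp he]
    have h0 : splitW (c :: pipeB t) cur = flushW cur ++ splitW (pipeB t) [] := by
      by_cases h : cur.isEmpty <;> simp [splitW, flushW, hs, h]
    rw [h0, ih]
    simp [tokW, hp, he, hs]
  | case5 c t cur hp he hs ih =>
    rw [pipeB_cons _ _ hp he, splitW_nonspace (by simpa using hs), ih]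
    simp [tokW, hp, he, hs]

-- A's append-unless-ignored fold is a filter
lemma foldl_skip (l : List String) (acc : List String) :
    l.foldl (fun acc tok => if tok ∈ ignored_tokens then acc else acc ++ [tok]) acc =
      acc ++ l.filter (fun tok => !(ignored_tokens.contains tok)) := by
  induction l generalizing acc with
  | nil => simp
  | cons x xs ih =>
    rw [List.foldl_cons]
    by_cases h : x ∈ ignored_tokens
    · rw [if_pos h, ih]
      have hf : List.filter (fun tok => !(ignored_tokens.contains tok)) (x :: xs) =
          List.filter (fun tok => !(ignored_tokens.contains tok)) xs := by
        simp [List.filter_cons]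
        exact h
      rw [hf]
    · rw [if_neg h, ih]
      have hc : ignored_tokens.contains x = false := by
        rw [← Bool.not_eq_true]; intro hc; exact h (List.contains_iff_mem.1 hc)
      have hf : List.filter (fun tok => !(ignored_tokens.contains tok)) (x :: xs) =
          x :: List.filter (fun tok => !(ignored_tokens.contains tok)) xs := by
        simp [List.filter_cons]
        exact h
      rw [hf]
      simp

-- the string-level keep predicate agrees with the character-level one
lemma keep_agree (tok : String) :
    (!(ignored_tokens.contains tok)) = keepC tok.toList := by
  by_cases hp : tok = "<pad>"
  · subst hp; decide
  · by_cases he : tok = "</s>"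
    · subst he; decide
    · have h2p : tok.toList ≠ padT := fun h => hp (by rw [← String.toList_inj, h]; decide)
      have h2e : tok.toList ≠ eosT := fun h => he (by rw [← String.toList_inj, h]; decide)
      simp [ignored_tokens, keepC, hp, he, h2p, h2e]

-- ===== VERDICT (by name: the statement is the Claim_ definition above) =====
set_option maxHeartbeats 1000000 in
theorem remove_ignored_tokens_spec : Claim_equal_remove_ignored_tokens := by
  intro sexpr _
  show PySem.Str.join " "
      ((PySem.Str.split₀
          (PySem.Str.replace (PySem.Str.replace sexpr "<pad>" (" " ++ "<pad>" ++ " "))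
            "</s>" (" " ++ "</s>" ++ " "))).foldl
        (fun acc tok => if tok ∈ ignored_tokens then acc else acc ++ [tok]) []) =
    PySem.Str.join " "
      (PySem.Str.split₀ (PySem.Str.replace (PySem.Str.replace sexpr "<pad>" " ") "</s>" " "))
  rw [← String.toList_inj, PySem.Str.toList_join, PySem.Str.toList_join]
  apply congrArg
  rw [foldl_skip, List.nil_append]
  rw [funext keep_agree]
  have hfm := @List.filter_map String (List Char) String.toList
            (fun tk => keepC tk) ((PySem.Str.split₀
              (PySem.Str.replace (PySem.Str.replace sexpr "<pad>" (" " ++ "<pad>" ++ " "))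
                "</s>" (" " ++ "</s>" ++ " "))))
  rw [Function.comp_def] at hfm
  rw [← hfm]
  rw [PySem.Str.split₀_map_toList, PySem.Str.split₀_map_toList]
  rw [PySem.Str.toList_replace, PySem.Str.toList_replace,
      PySem.Str.toList_replace, PySem.Str.toList_replace]
  have e1 : (" " ++ "<pad>" ++ " ").toList = spP := by decide
  have e2 : (" " ++ "</s>" ++ " ").toList = spE := by decide
  have e3 : ("<pad>" : String).toList = padT := by decide
  have e4 : ("</s>" : String).toList = eosT := by decide
  have e5 : (" " : String).toList = [' '] := by decide
  rw [e1, e2, e3, e4, e5]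
  rw [split₀_eq_splitW, split₀_eq_splitW]
  show List.filter keepC (splitW (pipeA sexpr.toList) []) = splitW (pipeB sexpr.toList) []
  rw [thmA _ _ (invW_nil _), thmB]
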